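-- pv_equiv track=rewrite | github.com/2226171237/Algorithmpractice | 机试/拼多多/test2.py | allPoints
-- ===== SOURCE A (Python) =====
-- def up_down(point):
--     # 绕上下轴旋转
--     a1, a2, a3, a4, a5, a6 = point
--     return [(a1, a2, a6, a5, a3, a4), (a1, a2, a4, a3, a6, a5), (a1, a2, a5, a6, a4, a3)]
--
-- def left_right(point):
--     # 绕左右轴旋转
--     a1, a2, a3, a4, a5, a6 = point
--     return [(a6, a5, a3, a4, a1, a2), (a2, a1, a3, a4, a6, a5), (a5, a6, a3, a4, a2, a1)]
--
-- def front_back(point):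
--     # 绕前后轴旋转
--     a1, a2, a3, a4, a5, a6 = point
--     return [(a4, a3, a1, a2, a5, a6), (a2, a1, a4, a3, a5, a6), (a3, a4, a2, a1, a5, a6)]
--
-- def allPoints(point):
--     # 枚举所有情况
--     result=set()
--     result.add(tuple(point))
--     while True:
--         temp=result.copy()
--         for p in temp:
--             for np in up_down(p)+left_right(p)+front_back(p):
--                 if np not in result:
--                     result.add(np)
--         if len(temp)==len(result):
--             break
--     return sorted(result)[0] # 返回排序第一个
-- ===== SOURCE B (Python) =====
-- def allPoints(point):
--     # Worklist BFS over the rotation orbit using only the three quarter turns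
--     # (one per axis), which generate all 24 cube rotations; then take min.
--     a1, a2, a3, a4, a5, a6 = point
--     start = (a1, a2, a3, a4, a5, a6)
--     seen = {start}
--     frontier = [start]
--     while frontier:
--         new = []
--         for b1, b2, b3, b4, b5, b6 in frontier:
--             for q in ((b1, b2, b6, b5, b3, b4),   # quarter turn about the up-down axis
--                       (b6, b5, b3, b4, b1, b2),   # quarter turn about the left-right axis
--                       (b4, b3, b1, b2, b5, b6)):  # quarter turn about the front-back axis
--                 if q not in seen:
--                     seen.add(q)
--                     new.append(q)
--         frontier = new
--     return min(seen)
-- ===== Notes on version B (the rewrite author's own statement) =====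
-- stated objective: alternative
-- what changed: Replaces A's copy-and-rescan fixpoint (re-expanding the whole growing set with all 9 rotations each round until its size stabilises, then sorted(set)[0]) with a frontier BFS that expands each orientation exactly once using only the 3 quarter-turn generators and returns min(seen).
import Mathlib
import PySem

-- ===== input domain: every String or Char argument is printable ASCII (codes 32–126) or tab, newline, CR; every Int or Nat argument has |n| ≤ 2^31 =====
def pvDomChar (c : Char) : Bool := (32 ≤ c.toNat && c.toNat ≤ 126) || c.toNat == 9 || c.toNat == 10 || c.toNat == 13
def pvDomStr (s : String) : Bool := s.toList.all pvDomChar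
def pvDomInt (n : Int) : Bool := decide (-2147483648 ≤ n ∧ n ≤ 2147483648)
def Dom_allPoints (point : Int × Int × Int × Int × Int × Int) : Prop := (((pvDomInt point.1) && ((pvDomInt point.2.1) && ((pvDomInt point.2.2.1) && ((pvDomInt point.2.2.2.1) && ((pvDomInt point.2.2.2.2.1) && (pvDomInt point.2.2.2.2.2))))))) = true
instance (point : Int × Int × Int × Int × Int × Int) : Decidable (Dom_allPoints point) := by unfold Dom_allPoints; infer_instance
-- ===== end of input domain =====

-- B replaces A's copy-and-rescan fixpoint over 9 rotation images with a frontier BFS over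
-- the 3 quarter-turn generators and takes min(seen) instead of sorted(seen)[0] (alternative).

-- Shared helper machinery (index permutations of 6-tuples): used by both ports'
-- termination arguments (the loops stop because every state is one of the 24 rotation
-- images of the input), and by the proofs below.
abbrev T6 : Type := Int × Int × Int × Int × Int × Int
abbrev P6 : Type := Nat × Nat × Nat × Nat × Nat × Nat

def get6 (p : T6) (i : Nat) : Int :=
  match i with
  | 0 => p.1 | 1 => p.2.1 | 2 => p.2.2.1 | 3 => p.2.2.2.1 | 4 => p.2.2.2.2.1 | 5 => p.2.2.2.2.2
  | _ => 0

def idx6 (s : P6) (i : Nat) : Nat :=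
  match i with
  | 0 => s.1 | 1 => s.2.1 | 2 => s.2.2.1 | 3 => s.2.2.2.1 | 4 => s.2.2.2.2.1 | 5 => s.2.2.2.2.2
  | _ => 0

def appP (s : P6) (p : T6) : T6 :=
  (get6 p s.1, get6 p s.2.1, get6 p s.2.2.1, get6 p s.2.2.2.1, get6 p s.2.2.2.2.1, get6 p s.2.2.2.2.2)

def compP (g s : P6) : P6 :=
  (idx6 s g.1, idx6 s g.2.1, idx6 s g.2.2.1, idx6 s g.2.2.2.1, idx6 s g.2.2.2.2.1, idx6 s g.2.2.2.2.2)

def idP : P6 := (0, 1, 2, 3, 4, 5)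

-- The 24 rotations of the cube, as source-index permutations of the 6 faces.
def P24 : List P6 :=
  [(0,1,2,3,4,5),(0,1,3,2,5,4),(0,1,4,5,3,2),(0,1,5,4,2,3),(1,0,2,3,5,4),(1,0,3,2,4,5),
   (1,0,4,5,2,3),(1,0,5,4,3,2),(2,3,0,1,5,4),(2,3,1,0,4,5),(2,3,4,5,0,1),(2,3,5,4,1,0),
   (3,2,0,1,4,5),(3,2,1,0,5,4),(3,2,4,5,1,0),(3,2,5,4,0,1),(4,5,0,1,2,3),(4,5,1,0,3,2),
   (4,5,2,3,1,0),(4,5,3,2,0,1),(5,4,0,1,3,2),(5,4,1,0,2,3),(5,4,2,3,0,1),(5,4,3,2,1,0)]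

-- A's nine generators (up_down ++ left_right ++ front_back), as index permutations.
def gens9 : List P6 :=
  [(0,1,5,4,2,3),(0,1,3,2,5,4),(0,1,4,5,3,2),
   (5,4,2,3,0,1),(1,0,2,3,5,4),(4,5,2,3,1,0),
   (3,2,0,1,4,5),(1,0,3,2,4,5),(2,3,1,0,4,5)]

-- B's three quarter-turn generators.
def gens3 : List P6 := [(0,1,5,4,2,3),(5,4,2,3,0,1),(3,2,0,1,4,5)]

abbrev validP (g : P6) : Prop :=
  g.1 < 6 ∧ g.2.1 < 6 ∧ g.2.2.1 < 6 ∧ g.2.2.2.1 < 6 ∧ g.2.2.2.2.1 < 6 ∧ g.2.2.2.2.2 < 6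

-- Python's `<` on two int-6-tuples (lexicographic), used by both ports (A's sorted,
-- B's min); exact on this domain.
def tupLt (a b : T6) : Bool :=
  decide (a.1 < b.1 ∨ (a.1 = b.1 ∧ (a.2.1 < b.2.1 ∨ (a.2.1 = b.2.1 ∧
    (a.2.2.1 < b.2.2.1 ∨ (a.2.2.1 = b.2.2.1 ∧ (a.2.2.2.1 < b.2.2.2.1 ∨ (a.2.2.2.1 = b.2.2.2.1 ∧
    (a.2.2.2.2.1 < b.2.2.2.2.1 ∨ (a.2.2.2.2.1 = b.2.2.2.2.1 ∧ a.2.2.2.2.2 < b.2.2.2.2.2))))))))))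

-- ===== PORT A =====
def up_down : T6 → List T6
  | (a1, a2, a3, a4, a5, a6) => [(a1,a2,a6,a5,a3,a4),(a1,a2,a4,a3,a6,a5),(a1,a2,a5,a6,a4,a3)]

def left_right : T6 → List T6
  | (a1, a2, a3, a4, a5, a6) => [(a6,a5,a3,a4,a1,a2),(a2,a1,a3,a4,a6,a5),(a5,a6,a3,a4,a2,a1)]

def front_back : T6 → List T6
  | (a1, a2, a3, a4, a5, a6) => [(a4,a3,a1,a2,a5,a6),(a2,a1,a4,a3,a5,a6),(a3,a4,a2,a1,a5,a6)]

def neighborsA (p : T6) : List T6 := up_down p ++ left_right p ++ front_back p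

-- one round of A's `for p in temp: for np in …: if np not in result: result.add(np)`
def expandA (temp : List T6) (result : PySem.Set T6) : PySem.Set T6 :=
  temp.foldl (fun acc p => (neighborsA p).foldl PySem.Set.add acc) result

-- loop invariant carried only for termination/totality: the set is duplicate-free and
-- every member is one of the 24 rotation images of the starting point (p0 is a ghost arg)
def InvA (p0 : T6) (r : List T6) : Prop :=
  r.Nodup ∧ ∀ x ∈ r, ∃ s ∈ P24, x = appP s p0

theorem neighborsA_eq (p : T6) : neighborsA p = gens9.map (fun g => appP g p) := by
  obtain ⟨a1, a2, a3, a4, a5, a6⟩ := p; rfl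

theorem get6_appP (s : P6) (p : T6) (i : Nat) (h : i < 6) :
    get6 (appP s p) i = get6 p (idx6 s i) := by
  interval_cases i <;> rfl

theorem app_comp (g s : P6) (hg : validP g) (p : T6) :
    appP g (appP s p) = appP (compP g s) p := by
  obtain ⟨g1, g2, g3, g4, g5, g6⟩ := g
  obtain ⟨h1, h2, h3, h4, h5, h6⟩ := hg
  show (get6 (appP s p) g1, get6 (appP s p) g2, get6 (appP s p) g3, get6 (appP s p) g4,
      get6 (appP s p) g5, get6 (appP s p) g6) =
    (get6 p (idx6 s g1), get6 p (idx6 s g2), get6 p (idx6 s g3), get6 p (idx6 s g4),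
      get6 p (idx6 s g5), get6 p (idx6 s g6))
  rw [get6_appP s p g1 h1, get6_appP s p g2 h2, get6_appP s p g3 h3,
      get6_appP s p g4 h4, get6_appP s p g5 h5, get6_appP s p g6 h6]

theorem app_id (p : T6) : appP idP p = p := by
  obtain ⟨a1, a2, a3, a4, a5, a6⟩ := p; rfl

theorem gens9_valid : ∀ g ∈ gens9, validP g := by decide
theorem gens3_valid : ∀ g ∈ gens3, validP g := by decide
theorem idP_mem_P24 : idP ∈ P24 := by decide
theorem comp9_closed : ∀ g ∈ gens9, ∀ s ∈ P24, compP g s ∈ P24 := by decide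
theorem comp3_closed : ∀ g ∈ gens3, ∀ s ∈ P24, compP g s ∈ P24 := by decide

theorem mem_foldl_add {l : List T6} {acc : PySem.Set T6} {y : T6} :
    y ∈ l.foldl PySem.Set.add acc ↔ y ∈ acc ∨ y ∈ l := by
  induction l generalizing acc with
  | nil => simp
  | cons x t ih => simp [List.foldl_cons, ih, PySem.Set.mem_add, or_assoc]

theorem foldl_add_prefix (l : List T6) (acc : PySem.Set T6) :
    ∃ ext, l.foldl PySem.Set.add acc = acc ++ ext := by
  induction l generalizing acc with
  | nil => exact ⟨[], by simp⟩
  | cons x t ih =>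
    simp only [List.foldl_cons, PySem.Set.add]
    split
    · exact ih acc
    · obtain ⟨ext, hext⟩ := ih (acc ++ [x])
      exact ⟨x :: ext, by simpa using hext⟩

theorem nodup_foldl_add {l : List T6} {acc : PySem.Set T6} (h : acc.Nodup) :
    (l.foldl PySem.Set.add acc).Nodup := by
  induction l generalizing acc with
  | nil => exact h
  | cons x t ih => exact ih (PySem.Set.nodup_add acc x h)

theorem expandA_eq (temp : List T6) (result : PySem.Set T6) :
    expandA temp result = (temp.flatMap neighborsA).foldl PySem.Set.add result := by
  simp [expandA, List.foldl_flatMap]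

theorem invA_expand {p0 : T6} {r : List T6} (h : InvA p0 r) : InvA p0 (expandA r r) := by
  obtain ⟨hnd, hsub⟩ := h
  rw [expandA_eq]
  refine ⟨nodup_foldl_add hnd, ?_⟩
  intro x hx
  rcases mem_foldl_add.1 hx with hx | hx
  · exact hsub x hx
  · rcases List.mem_flatMap.1 hx with ⟨p, hp, hnp⟩
    obtain ⟨s, hs, rfl⟩ := hsub p hp
    rw [neighborsA_eq] at hnp
    rcases List.mem_map.1 hnp with ⟨g, hg, rfl⟩
    exact ⟨compP g s, comp9_closed g hg s hs, app_comp g s (gens9_valid g hg) p0⟩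

theorem invA_len_le {p0 : T6} {r : List T6} (h : InvA p0 r) : r.length ≤ 24 := by
  obtain ⟨hnd, hsub⟩ := h
  have : r ⊆ P24.map (fun s => appP s p0) := by
    intro x hx
    obtain ⟨s, hs, rfl⟩ := hsub x hx
    exact List.mem_map.2 ⟨s, hs, rfl⟩
  have := (List.subperm_of_subset hnd this).length_le
  simpa using this

-- A's `while True: … if len(temp)==len(result): break` loop
def loopA (p0 : T6) (r : PySem.Set T6) (h : InvA p0 r) : PySem.Set T6 :=
  let r' := expandA r r
  if PySem.Set.len r = PySem.Set.len r' then r'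
  else loopA p0 r' (invA_expand h)
termination_by 25 - r.length
decreasing_by
  rename_i hne
  have hpre : ∃ ext, expandA r r = r ++ ext := by
    rw [expandA_eq]; exact foldl_add_prefix _ r
  obtain ⟨ext, hext⟩ := hpre
  have hL : (expandA r r).length = r.length + ext.length := by
    rw [hext]; simp
  have h1 : r.length < (expandA r r).length := by
    rcases Nat.eq_zero_or_pos ext.length with hz | hpos
    · exact absurd (by show PySem.Set.len r = PySem.Set.len (expandA r r)
                       simp only [PySem.Set.len]; omega) hne
    · omega
  have h24 := invA_len_le h
  show 25 - (expandA r r).length < 25 - r.length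
  omega

theorem invA_init (p0 : T6) : InvA p0 (PySem.Set.add PySem.Set.empty p0) :=
  ⟨by simp [PySem.Set.add, PySem.Set.empty, PySem.Set.contains],
   by
    intro x hx
    simp [PySem.Set.add, PySem.Set.empty, PySem.Set.contains] at hx
    exact ⟨idP, idP_mem_P24, by rw [hx, app_id]⟩⟩

def allPoints (point : Int × Int × Int × Int × Int × Int) : Int × Int × Int × Int × Int × Int :=
  -- result=set(); result.add(tuple(point))
  let result : PySem.Set T6 := PySem.Set.add PySem.Set.empty point
  let F := loopA point result (invA_init point)
  -- sorted(result)[0]: Python sorts int-6-tuples lexicographically; insertion sort with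
  -- the lexicographic < is exact here (cf. PySem.List.sorted_eq_foldl_insertBy), and the
  -- default of pyGetD is never used (the set contains the input point).
  PySem.List.pyGetD (F.foldl (fun acc x => PySem.List.insertBy tupLt x acc) []) 0 (0,0,0,0,0,0)

-- ===== PORT B =====
def neighborsB : T6 → List T6
  | (b1, b2, b3, b4, b5, b6) =>
    [(b1,b2,b6,b5,b3,b4),(b6,b5,b3,b4,b1,b2),(b4,b3,b1,b2,b5,b6)]

-- `if q not in seen: seen.add(q); new.append(q)`
def stepB (st : PySem.Set T6 × List T6) (q : T6) : PySem.Set T6 × List T6 :=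
  if PySem.Set.contains st.1 q then st else (st.1 ++ [q], st.2 ++ [q])

-- one round of B's `for … in frontier: for q in …`
def expandB (frontier : List T6) (st : PySem.Set T6 × List T6) : PySem.Set T6 × List T6 :=
  frontier.foldl (fun st p => (neighborsB p).foldl stepB st) st

theorem neighborsB_eq (p : T6) : neighborsB p = gens3.map (fun g => appP g p) := by
  obtain ⟨b1, b2, b3, b4, b5, b6⟩ := p; rfl

-- B's loop invariant (again carried only for termination; p0 is a ghost arg):
-- seen is duplicate-free, all its members are rotation images of p0, the frontier
-- is inside seen, and every seen state is on the frontier or fully processed.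
def InvB (p0 : T6) (seen frontier : List T6) : Prop :=
  seen.Nodup ∧ (∀ x ∈ seen, ∃ s ∈ P24, x = appP s p0) ∧ (∀ x ∈ frontier, x ∈ seen) ∧
    (∀ x ∈ seen, x ∈ frontier ∨ ∀ q ∈ neighborsB x, q ∈ seen)

theorem foldl_stepB (l : List T6) (s n : List T6) (hnd : s.Nodup) :
    ∃ ext, l.foldl stepB (s, n) = (s ++ ext, n ++ ext) ∧ (s ++ ext).Nodup ∧
      (∀ x ∈ ext, x ∈ l) ∧ (∀ x ∈ l, x ∈ s ++ ext) := by
  induction l generalizing s n with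
  | nil => exact ⟨[], by simp, by simpa using hnd, by simp, by simp⟩
  | cons x t ih =>
    simp only [List.foldl_cons, stepB]
    by_cases hc : x ∈ s
    · have : PySem.Set.contains s x = true := by
        simp [PySem.Set.contains, hc]
      rw [if_pos this]
      obtain ⟨ext, heq, hnd', hsub, hall⟩ := ih s n hnd
      refine ⟨ext, heq, hnd', fun y hy => List.mem_cons_of_mem _ (hsub y hy), ?_⟩
      intro y hy
      rcases List.mem_cons.1 hy with rfl | hy
      · exact List.mem_append_left _ hc
      · exact hall y hy
    · have hcf : PySem.Set.contains s x = false := by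
        simp [PySem.Set.contains, hc]
      rw [if_neg (by rw [hcf]; simp)]
      have hnd1 : (s ++ [x]).Nodup := by
        refine List.Nodup.append hnd (List.nodup_singleton x) ?_
        intro a ha hax
        simp only [List.mem_singleton] at hax
        exact hc (hax ▸ ha)
      obtain ⟨ext, heq, hnd', hsub, hall⟩ := ih (s ++ [x]) (n ++ [x]) hnd1
      refine ⟨x :: ext, by simpa using heq, by simpa using hnd', ?_, ?_⟩
      · intro y hy
        rcases List.mem_cons.1 hy with rfl | hy
        · exact List.mem_cons_self
        · exact List.mem_cons_of_mem _ (hsub y hy)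
      · intro y hy
        rcases List.mem_cons.1 hy with rfl | hy
        · simp
        · have := hall y hy; simpa [or_assoc] using this

theorem expandB_eq (frontier : List T6) (st : PySem.Set T6 × List T6) :
    expandB frontier st = (frontier.flatMap neighborsB).foldl stepB st := by
  simp [expandB, List.foldl_flatMap]

theorem invB_expand {p0 : T6} {seen frontier : List T6} (h : InvB p0 seen frontier) :
    InvB p0 (expandB frontier (seen, [])).1 (expandB frontier (seen, [])).2 := by
  obtain ⟨hnd, hsub, hfr, hproc⟩ := h
  rw [expandB_eq]
  obtain ⟨ext, heq, hnd', hextmem, hallmem⟩ :=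
    foldl_stepB (frontier.flatMap neighborsB) seen [] hnd
  rw [heq]
  have hextsub : ∀ x ∈ ext, ∃ p ∈ frontier, x ∈ neighborsB p := by
    intro x hx
    exact List.mem_flatMap.1 (hextmem x hx)
  refine ⟨hnd', ?_, ?_, ?_⟩
  · intro x hx
    rcases List.mem_append.1 hx with hx | hx
    · exact hsub x hx
    · obtain ⟨p, hp, hnp⟩ := hextsub x hx
      obtain ⟨t, ht, rfl⟩ := hsub p (hfr p hp)
      rw [neighborsB_eq] at hnp
      obtain ⟨g, hg, rfl⟩ := List.mem_map.1 hnp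
      exact ⟨compP g t, comp3_closed g hg t ht, app_comp g t (gens3_valid g hg) p0⟩
  · intro x hx
    exact List.mem_append_right _ (by simpa using hx)
  · intro x hx
    rcases List.mem_append.1 hx with hx | hx
    · rcases hproc x hx with hx' | hx'
      · right
        intro q hq
        exact hallmem q (List.mem_flatMap.2 ⟨x, hx', hq⟩)
      · right
        intro q hq
        exact List.mem_append_left _ (hx' q hq)
    · left; simpa using hx

theorem invB_len_le {p0 : T6} {seen frontier : List T6} (h : InvB p0 seen frontier) :
    seen.length ≤ 24 := by
  obtain ⟨hnd, hsub, -, -⟩ := h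
  have hss : seen ⊆ P24.map (fun s => appP s p0) := by
    intro x hx
    obtain ⟨t, ht, rfl⟩ := hsub x hx
    exact List.mem_map.2 ⟨t, ht, rfl⟩
  have := (List.subperm_of_subset hnd hss).length_le
  simpa using this

theorem expandB_shape (p0 : T6) (seen frontier : List T6) (h : InvB p0 seen frontier) :
    ∃ ext, expandB frontier (seen, []) = (seen ++ ext, ext) := by
  rw [expandB_eq]
  obtain ⟨ext, heq, -, -, -⟩ := foldl_stepB (frontier.flatMap neighborsB) seen [] h.1
  exact ⟨ext, by simpa using heq⟩

-- B's `while frontier:` loop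
def loopB (p0 : T6) (seen : PySem.Set T6) (frontier : List T6) (h : InvB p0 seen frontier) :
    PySem.Set T6 :=
  if hf : frontier = [] then seen
  else
    loopB p0 (expandB frontier (seen, [])).1 (expandB frontier (seen, [])).2 (invB_expand h)
termination_by (25 - seen.length, frontier.length)
decreasing_by
  obtain ⟨ext, hext⟩ := expandB_shape p0 seen frontier h
  rcases List.eq_nil_or_concat ext with rfl | hc
  · simp only [List.append_nil] at hext
    rw [hext]
    exact Prod.Lex.right _ (by simpa using List.length_pos_iff.2 hf)
  · rw [hext]
    apply Prod.Lex.left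
    have h24 := invB_len_le h
    have hne : ext ≠ [] := by rcases hc with ⟨_, _, rfl⟩; simp
    have hpos : 0 < ext.length := List.length_pos_iff.2 hne
    simp only [List.length_append]
    omega

theorem invB_init (p0 : T6) : InvB p0 (PySem.Set.ofList [p0]) [p0] := by
  refine ⟨by simp [PySem.Set.ofList_eq_self_of_nodup], ?_, ?_, ?_⟩
  · intro x hx
    simp [PySem.Set.ofList_eq_self_of_nodup] at hx
    exact ⟨idP, idP_mem_P24, by rw [hx, app_id]⟩
  · simp [PySem.Set.ofList_eq_self_of_nodup]
  · intro x hx; left; simpa [PySem.Set.ofList_eq_self_of_nodup] using hx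

def allPoints_alt (point : Int × Int × Int × Int × Int × Int) : Int × Int × Int × Int × Int × Int :=
  match point with
  | (a1, a2, a3, a4, a5, a6) =>
    let start : T6 := (a1, a2, a3, a4, a5, a6)
    let seen := PySem.Set.ofList [start]
    let F := loopB start seen [start] (invB_init start)
    -- min(seen): Python's min over int-6-tuples under the lexicographic <; the []
    -- branch is unreachable (seen contains start).
    match F with
    | [] => (0, 0, 0, 0, 0, 0)
    | m :: t => t.foldl (fun m x => if tupLt x m then x else m) m

-- ===== PRECONDITION & SPEC =====
def Spec_allPoints (point : Int × Int × Int × Int × Int × Int) (out : Int × Int × Int × Int × Int × Int) : Prop := out = allPoints_alt point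
instance (point : Int × Int × Int × Int × Int × Int) (out : Int × Int × Int × Int × Int × Int) : Decidable (Spec_allPoints point out) := by unfold Spec_allPoints; infer_instance

-- ===== CLAIM (what is proved, stated in full; the proofs are below) =====
def Claim_equal_allPoints : Prop := ∀ (point : Int × Int × Int × Int × Int × Int), Dom_allPoints point → Spec_allPoints point (allPoints point)

-- ===== LEMMAS AND PROOFS =====

-- ---- A's loop computes a closed, sound set ----
theorem loopA_sup (p0 : T6) (r : PySem.Set T6) (h : InvA p0 r) :
    ∀ x ∈ r, x ∈ loopA p0 r h := by
  fun_induction loopA with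
  | case1 r h r' hlen =>
    intro x hx
    show x ∈ expandA r r
    rw [expandA_eq]
    exact mem_foldl_add.2 (Or.inl hx)
  | case2 r h r' hlen ih =>
    intro x hx
    apply ih
    show x ∈ expandA r r
    rw [expandA_eq]
    exact mem_foldl_add.2 (Or.inl hx)

theorem loopA_sound (p0 : T6) (r : PySem.Set T6) (h : InvA p0 r) :
    ∀ x ∈ loopA p0 r h, ∃ s ∈ P24, x = appP s p0 := by
  fun_induction loopA with
  | case1 r h r' hlen => exact (invA_expand h).2
  | case2 r h r' hlen ih => exact ih

theorem expandA_fix {r : PySem.Set T6}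
    (hlen : PySem.Set.len r = PySem.Set.len (expandA r r)) : expandA r r = r := by
  obtain ⟨ext, hext⟩ : ∃ ext, expandA r r = r ++ ext := by
    rw [expandA_eq]; exact foldl_add_prefix _ r
  have hL := congrArg List.length hext
  simp only [PySem.Set.len, Nat.cast_inj] at hlen
  simp only [List.length_append] at hL
  have : ext = [] := List.length_eq_zero_iff.1 (by omega)
  rw [hext, this, List.append_nil]

theorem loopA_closed (p0 : T6) (r : PySem.Set T6) (h : InvA p0 r) :
    ∀ x ∈ loopA p0 r h, ∀ y ∈ neighborsA x, y ∈ loopA p0 r h := by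
  fun_induction loopA with
  | case1 r h r' hlen =>
    intro x hx y hy
    have hfix : expandA r r = r := expandA_fix hlen
    show y ∈ expandA r r
    rw [expandA_eq]
    refine mem_foldl_add.2 (Or.inr (List.mem_flatMap.2 ⟨x, ?_, hy⟩))
    have hx' : x ∈ expandA r r := hx
    rwa [hfix] at hx'
  | case2 r h r' hlen ih => exact ih

-- ---- B's loop computes a closed, sound set ----
theorem loopB_sup (p0 : T6) (seen : PySem.Set T6) (frontier : List T6) (h : InvB p0 seen frontier) :
    ∀ x ∈ seen, x ∈ loopB p0 seen frontier h := by
  fun_induction loopB with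
  | case1 seen h => intro x hx; exact hx
  | case2 seen frontier h hf ih =>
    intro x hx
    apply ih
    obtain ⟨ext, heq⟩ := expandB_shape p0 seen frontier h
    show x ∈ (expandB frontier (seen, [])).1
    rw [heq]
    exact List.mem_append_left _ hx

theorem loopB_sound (p0 : T6) (seen : PySem.Set T6) (frontier : List T6) (h : InvB p0 seen frontier) :
    ∀ x ∈ loopB p0 seen frontier h, ∃ s ∈ P24, x = appP s p0 := by
  fun_induction loopB with
  | case1 seen h => exact h.2.1
  | case2 seen frontier h hf ih => exact ih

theorem loopB_closed (p0 : T6) (seen : PySem.Set T6) (frontier : List T6) (h : InvB p0 seen frontier) :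
    ∀ x ∈ loopB p0 seen frontier h, ∀ q ∈ neighborsB x, q ∈ loopB p0 seen frontier h := by
  fun_induction loopB with
  | case1 seen h =>
    intro x hx q hq
    rcases h.2.2.2 x hx with hx' | hpr
    · cases hx'
    · exact hpr q hq
  | case2 seen frontier h hf ih => exact ih

-- ---- completeness: every one of the 24 rotation images is in any closed set containing p0 ----
def ball (G : List P6) : Nat → List P6
  | 0 => [idP]
  | n + 1 => ball G n ++ G.flatMap (fun g => (ball G n).map (compP g))

theorem ball_complete (G : List P6) (hv : ∀ g ∈ G, validP g) (p0 : T6) (F : List T6)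
    (hp : p0 ∈ F) (hcl : ∀ x ∈ F, ∀ g ∈ G, appP g x ∈ F) :
    ∀ n, ∀ s ∈ ball G n, appP s p0 ∈ F := by
  intro n
  induction n with
  | zero =>
    intro s hs
    simp only [ball, List.mem_singleton] at hs
    rw [hs, app_id]
    exact hp
  | succ n ih =>
    intro s hs
    rcases List.mem_append.1 hs with hs | hs
    · exact ih s hs
    · obtain ⟨g, hg, hs'⟩ := List.mem_flatMap.1 hs
      obtain ⟨t, ht, rfl⟩ := List.mem_map.1 hs'
      rw [← app_comp g t (hv g hg)]
      exact hcl _ (ih t ht) g hg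

theorem P24_ball9 : ∀ s ∈ P24, s ∈ ball gens9 2 := by decide
theorem P24_ball3 : ∀ s ∈ P24, s ∈ ball gens3 4 := by decide

-- ---- the lexicographic order on 6-tuples ----
def LtP : T6 → T6 → Prop
  | (a1, a2, a3, a4, a5, a6), (b1, b2, b3, b4, b5, b6) =>
    a1 < b1 ∨ (a1 = b1 ∧ (a2 < b2 ∨ (a2 = b2 ∧ (a3 < b3 ∨ (a3 = b3 ∧
      (a4 < b4 ∨ (a4 = b4 ∧ (a5 < b5 ∨ (a5 = b5 ∧ a6 < b6)))))))))

theorem tupLt_iff (a b : T6) : tupLt a b = true ↔ LtP a b := by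
  obtain ⟨a1, a2, a3, a4, a5, a6⟩ := a
  obtain ⟨b1, b2, b3, b4, b5, b6⟩ := b
  simp [tupLt, LtP]

theorem ltp_irrefl (a : T6) : ¬ LtP a a := by
  obtain ⟨a1, a2, a3, a4, a5, a6⟩ := a
  simp only [LtP]
  omega

theorem ltp_trans {a b c : T6} (h1 : LtP a b) (h2 : LtP b c) : LtP a c := by
  obtain ⟨a1, a2, a3, a4, a5, a6⟩ := a
  obtain ⟨b1, b2, b3, b4, b5, b6⟩ := b
  obtain ⟨c1, c2, c3, c4, c5, c6⟩ := c
  simp only [LtP] at h1 h2 ⊢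
  omega

theorem ltp_conn {a b : T6} (h1 : ¬ LtP a b) (h2 : ¬ LtP b a) : a = b := by
  obtain ⟨a1, a2, a3, a4, a5, a6⟩ := a
  obtain ⟨b1, b2, b3, b4, b5, b6⟩ := b
  simp only [LtP] at h1 h2
  simp only [Prod.mk.injEq]
  omega

def LeT (a b : T6) : Prop := ¬ LtP b a

-- ---- A's insertion sort: membership and head-minimality ----
theorem mem_sortfold (l : List T6) (acc : List T6) (x : T6) :
    x ∈ l.foldl (fun acc x => PySem.List.insertBy tupLt x acc) acc ↔
      x ∈ acc ∨ x ∈ l := by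
  induction l generalizing acc with
  | nil => simp
  | cons y t ih =>
    simp only [List.foldl_cons, List.mem_cons, ih, PySem.List.mem_insertBy]
    tauto

theorem pairwise_insertBy {acc : List T6} {x : T6} (h : acc.Pairwise LeT) :
    (PySem.List.insertBy tupLt x acc).Pairwise LeT := by
  induction acc with
  | nil => simp [PySem.List.insertBy]
  | cons y ys ih =>
    rw [show PySem.List.insertBy tupLt x (y :: ys) =
      if tupLt x y then x :: y :: ys
      else y :: PySem.List.insertBy tupLt x ys from rfl]
    rcases List.pairwise_cons.1 h with ⟨hy, hys⟩
    by_cases hb : tupLt x y = true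
    · rw [if_pos hb]
      have hxy : LtP x y := (tupLt_iff _ _).1 hb
      refine List.pairwise_cons.2 ⟨?_, h⟩
      intro z hz
      rcases List.mem_cons.1 hz with rfl | hz
      · exact fun hzx => ltp_irrefl x (ltp_trans hxy hzx)
      · exact fun hzx => hy z hz (ltp_trans hzx hxy)
    · rw [if_neg hb]
      have hnxy : ¬ LtP x y := fun hl => hb ((tupLt_iff _ _).2 hl)
      refine List.pairwise_cons.2 ⟨?_, ih hys⟩
      intro z hz
      rcases (PySem.List.mem_insertBy _ _ _ _).1 hz with rfl | hz
      · exact hnxy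
      · exact hy z hz

theorem pairwise_sortfold (l : List T6) (acc : List T6) (h : acc.Pairwise LeT) :
    (l.foldl (fun acc x => PySem.List.insertBy tupLt x acc) acc).Pairwise LeT := by
  induction l generalizing acc with
  | nil => exact h
  | cons y t ih => exact ih _ (pairwise_insertBy h)

-- ---- B's running-minimum fold ----
theorem minfold (t : List T6) : ∀ m : T6,
    t.foldl (fun m x => if tupLt x m then x else m) m ∈ m :: t ∧
      ∀ y ∈ m :: t, ¬ LtP y (t.foldl (fun m x => if tupLt x m then x else m) m) := by
  induction t with
  | nil =>
    intro m
    refine ⟨List.mem_cons_self, ?_⟩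
    intro y hy
    rcases List.mem_cons.1 hy with rfl | hy
    · exact ltp_irrefl y
    · cases hy
  | cons x t ih =>
    intro m
    simp only [List.foldl_cons]
    by_cases hb : tupLt x m = true
    · rw [if_pos hb]
      have hxm : LtP x m := (tupLt_iff _ _).1 hb
      obtain ⟨hmem, hmin⟩ := ih x
      refine ⟨?_, ?_⟩
      · rcases List.mem_cons.1 hmem with h' | h'
        · rw [h']; exact List.mem_cons_of_mem _ List.mem_cons_self
        · exact List.mem_cons_of_mem _ (List.mem_cons_of_mem _ h')
      · intro y hy
        rcases List.mem_cons.1 hy with rfl | hy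
        · intro hmr
          exact hmin x List.mem_cons_self (ltp_trans hxm hmr)
        · exact hmin y hy
    · rw [if_neg hb]
      have hnxm : ¬ LtP x m := fun hl => hb ((tupLt_iff _ _).2 hl)
      obtain ⟨hmem, hmin⟩ := ih m
      refine ⟨?_, ?_⟩
      · rcases List.mem_cons.1 hmem with h' | h'
        · rw [h']; exact List.mem_cons_self
        · exact List.mem_cons_of_mem _ (List.mem_cons_of_mem _ h')
      · intro y hy
        rcases List.mem_cons.1 hy with rfl | hy
        · exact hmin y List.mem_cons_self
        rcases List.mem_cons.1 hy with rfl | hy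
        · intro hxr
          by_cases hmx : LtP m y
          · exact hmin m List.mem_cons_self (ltp_trans hmx hxr)
          · have : y = m := ltp_conn hnxm hmx
            exact hmin m List.mem_cons_self (this ▸ hxr)
        · exact hmin y (List.mem_cons_of_mem _ hy)

-- ---- both final sets have the same members: the 24 rotation images of the input ----
theorem memA_iff (p0 x : T6) :
    x ∈ loopA p0 (PySem.Set.add PySem.Set.empty p0) (invA_init p0) ↔
      ∃ s ∈ P24, x = appP s p0 := by
  constructor
  · exact loopA_sound p0 _ (invA_init p0) x
  · rintro ⟨s, hs, rfl⟩
    have hp0 : p0 ∈ loopA p0 (PySem.Set.add PySem.Set.empty p0) (invA_init p0) := by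
      apply loopA_sup
      simp [PySem.Set.add, PySem.Set.empty, PySem.Set.contains]
    refine ball_complete gens9 gens9_valid p0 _ hp0 ?_ 2 s (P24_ball9 s hs)
    intro x hx g hg
    refine loopA_closed p0 _ (invA_init p0) x hx _ ?_
    rw [neighborsA_eq]
    exact List.mem_map.2 ⟨g, hg, rfl⟩

theorem memB_iff (p0 x : T6) :
    x ∈ loopB p0 (PySem.Set.ofList [p0]) [p0] (invB_init p0) ↔
      ∃ s ∈ P24, x = appP s p0 := by
  constructor
  · exact loopB_sound p0 _ _ (invB_init p0) x
  · rintro ⟨s, hs, rfl⟩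
    have hp0 : p0 ∈ loopB p0 (PySem.Set.ofList [p0]) [p0] (invB_init p0) := by
      apply loopB_sup
      simp [PySem.Set.ofList_eq_self_of_nodup]
    refine ball_complete gens3 gens3_valid p0 _ hp0 ?_ 4 s (P24_ball3 s hs)
    intro x hx g hg
    refine loopB_closed p0 _ _ (invB_init p0) x hx _ ?_
    rw [neighborsB_eq]
    exact List.mem_map.2 ⟨g, hg, rfl⟩

-- ===== VERDICT (by name: the statement is the Claim_ definition above) =====
theorem allPoints_spec : Claim_equal_allPoints := by
  unfold Claim_equal_allPoints
  intro point _
  unfold Spec_allPoints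
  obtain ⟨a1, a2, a3, a4, a5, a6⟩ := point
  have hAeq : allPoints (a1, a2, a3, a4, a5, a6) =
      PySem.List.pyGetD
        ((loopA (a1, a2, a3, a4, a5, a6)
            (PySem.Set.add PySem.Set.empty (a1, a2, a3, a4, a5, a6))
            (invA_init (a1, a2, a3, a4, a5, a6))).foldl
          (fun acc x => PySem.List.insertBy tupLt x acc) [])
        0 (0, 0, 0, 0, 0, 0) := rfl
  rw [hAeq]
  have hp0B := (memB_iff (a1, a2, a3, a4, a5, a6) (a1, a2, a3, a4, a5, a6)).2
    ⟨idP, idP_mem_P24, (app_id _).symm⟩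
  cases hFBc : loopB (a1, a2, a3, a4, a5, a6)
      (PySem.Set.ofList [(a1, a2, a3, a4, a5, a6)]) [(a1, a2, a3, a4, a5, a6)]
      (invB_init (a1, a2, a3, a4, a5, a6)) with
  | nil => rw [hFBc] at hp0B; cases hp0B
  | cons m0 t0 =>
    have hBeq : allPoints_alt (a1, a2, a3, a4, a5, a6) =
        t0.foldl (fun m x => if tupLt x m then x else m) m0 := by
      show (match loopB (a1, a2, a3, a4, a5, a6)
          (PySem.Set.ofList [(a1, a2, a3, a4, a5, a6)]) [(a1, a2, a3, a4, a5, a6)]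
          (invB_init (a1, a2, a3, a4, a5, a6)) with
        | [] => ((0 : Int), (0 : Int), (0 : Int), (0 : Int), (0 : Int), (0 : Int))
        | m :: t => t.foldl (fun m x => if tupLt x m then x else m) m) = _
      rw [hFBc]
    rw [hBeq]
    -- membership in B's set, through hFBc
    have hmemB : ∀ x, x ∈ m0 :: t0 ↔ ∃ s ∈ P24, x = appP s (a1, a2, a3, a4, a5, a6) := by
      intro x
      rw [← hFBc]
      exact memB_iff _ x
    -- A's sorted list
    have hmemSL : ∀ x,
        x ∈ (loopA (a1, a2, a3, a4, a5, a6)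
            (PySem.Set.add PySem.Set.empty (a1, a2, a3, a4, a5, a6))
            (invA_init (a1, a2, a3, a4, a5, a6))).foldl
          (fun acc x => PySem.List.insertBy tupLt x acc) [] ↔
          ∃ s ∈ P24, x = appP s (a1, a2, a3, a4, a5, a6) := by
      intro x
      rw [mem_sortfold]
      simp only [List.not_mem_nil, false_or]
      exact memA_iff _ x
    have hpw := pairwise_sortfold (loopA (a1, a2, a3, a4, a5, a6)
        (PySem.Set.add PySem.Set.empty (a1, a2, a3, a4, a5, a6))
        (invA_init (a1, a2, a3, a4, a5, a6))) [] List.Pairwise.nil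
    have hp0SL := (hmemSL (a1, a2, a3, a4, a5, a6)).2 ⟨idP, idP_mem_P24, (app_id _).symm⟩
    cases hSLc : (loopA (a1, a2, a3, a4, a5, a6)
        (PySem.Set.add PySem.Set.empty (a1, a2, a3, a4, a5, a6))
        (invA_init (a1, a2, a3, a4, a5, a6))).foldl
        (fun acc x => PySem.List.insertBy tupLt x acc) [] with
    | nil => rw [hSLc] at hp0SL; cases hp0SL
    | cons m t =>
      rw [hSLc] at hpw hmemSL
      rw [PySem.List.pyGetD_zero_cons]
      -- m is minimal among the orbit; so is B's running minimum; hence equal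
      have hminA : ∀ y, (∃ s ∈ P24, y = appP s (a1, a2, a3, a4, a5, a6)) → ¬ LtP y m := by
        intro y hy
        rcases List.mem_cons.1 ((hmemSL y).2 hy) with rfl | hyT
        · exact ltp_irrefl y
        · exact (List.pairwise_cons.1 hpw).1 y hyT
      obtain ⟨hmemMin, hminB⟩ := minfold t0 m0
      have hm : ∃ s ∈ P24, m = appP s (a1, a2, a3, a4, a5, a6) :=
        (hmemSL m).1 List.mem_cons_self
      have hr : ∃ s ∈ P24,
          t0.foldl (fun m x => if tupLt x m then x else m) m0 =
            appP s (a1, a2, a3, a4, a5, a6) :=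
        (hmemB _).1 hmemMin
      exact ltp_conn (hminB m ((hmemB m).2 hm)) (hminA _ hr)
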